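-- pv_equiv track=rewrite | github.com/derekdemunnik/CSAssignment523797 | CSAssignment.py | get_duplicateset_subset
-- ===== SOURCE A (Python) =====
-- from itertools import combinations
-- from collections import defaultdict
--
-- def get_duplicateset_subset(list_products, original_indices):
--     """
--     Identify true duplicate pairs in a subset using original indices.
--     """
--     # Dictionary to hold the products grouped by their modelID
--     true_duplicates = defaultdict(list)
--
--     # Group subset products by modelID
--     for original_idx, product in zip(original_indices, list_products):
--         true_duplicates[product['modelID']].append(original_idx)
--
--     # Generate pairs of duplicates
--     true_pairs = set()
--     for indices in true_duplicates.values():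
--         if len(indices) > 1:
--             for pair in combinations(indices, 2):
--                 true_pairs.add(tuple(sorted(pair)))
--
--     return true_pairs
-- ===== SOURCE B (Python) =====
-- def get_duplicateset_subset(list_products, original_indices):
--     items = list(zip(original_indices, list_products))
--     models = list(dict.fromkeys(p['modelID'] for _, p in items))
--     true_pairs = set()
--     for model in models:
--         remaining = [idx for idx, p in items if p['modelID'] == model]
--         while remaining:
--             x, remaining = remaining[0], remaining[1:]
--             for y in remaining:
--                 true_pairs.add((x, y) if x <= y else (y, x))
--     return true_pairs
-- ===== Notes on version B (the rewrite author's own statement) =====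
-- stated objective: alternative
-- what changed: Replaces the defaultdict grouping plus itertools.combinations with an ordered dedup of the modelIDs followed by a per-model rescan of the zipped items, expanding each group's pairs by head/tail list slicing.
import Mathlib
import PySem

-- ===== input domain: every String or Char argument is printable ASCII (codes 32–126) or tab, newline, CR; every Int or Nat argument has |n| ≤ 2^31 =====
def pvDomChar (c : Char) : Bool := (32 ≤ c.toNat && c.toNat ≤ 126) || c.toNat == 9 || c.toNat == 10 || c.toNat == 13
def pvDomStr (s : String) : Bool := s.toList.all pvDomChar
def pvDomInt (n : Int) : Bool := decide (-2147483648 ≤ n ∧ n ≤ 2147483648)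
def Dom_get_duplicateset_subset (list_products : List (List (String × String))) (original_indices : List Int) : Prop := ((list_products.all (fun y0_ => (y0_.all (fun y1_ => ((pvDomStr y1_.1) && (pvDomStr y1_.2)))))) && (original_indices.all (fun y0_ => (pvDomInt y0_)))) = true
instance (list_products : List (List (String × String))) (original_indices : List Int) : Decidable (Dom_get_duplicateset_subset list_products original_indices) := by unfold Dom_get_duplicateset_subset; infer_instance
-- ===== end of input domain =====

-- B replaces the defaultdict grouping + itertools.combinations with an ordered dedup of the
-- modelIDs followed by a per-model rescan of the zipped items, expanding each group's pairs by
-- head/tail slicing (objective: alternative algorithm, same results).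

-- ===== PORT A =====
-- product['modelID'] : first-match dict lookup; the "" default is unreachable under Pre_ (Python raises KeyError there)
def pvModel (p : List (String × String)) : String := (PySem.Dict.mk p).getD "modelID" ""

-- tuple(sorted(pair)) for a 2-element combination (combinations _ 2 only yields 2-element lists)
def pvPairOf (l : List Int) : Int × Int :=
  match PySem.List.sorted l (fun x => x) false with
  | [a, b] => (a, b)
  | _ => (0, 0)

def get_duplicateset_subset (list_products : List (List (String × String))) (original_indices : List Int) : List (Int × Int) :=
  let true_duplicates : PySem.Dict String (List Int) :=
    (original_indices.zip list_products).foldl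
      (fun d pr => d.modify (pvModel pr.2) [] (· ++ [pr.1])) PySem.Dict.empty
  true_duplicates.values.foldl
    (fun s indices =>
      if 1 < indices.length then
        (PySem.List.combinations indices 2).foldl (fun s pair => PySem.Set.add s (pvPairOf pair)) s
      else s)
    PySem.Set.empty

-- ===== PORT B =====
def pvMinMax (x y : Int) : Int × Int := if x ≤ y then (x, y) else (y, x)

-- the 'while remaining:' loop of Source B: split off the head, pair it with every later index
def pvPairsLoop : List Int → PySem.Set (Int × Int) → PySem.Set (Int × Int)
  | [], s => s
  | x :: remaining, s =>
      pvPairsLoop remaining (remaining.foldl (fun s y => PySem.Set.add s (pvMinMax x y)) s)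

def get_duplicateset_subset_alt (list_products : List (List (String × String))) (original_indices : List Int) : List (Int × Int) :=
  let items := original_indices.zip list_products
  let models := PySem.List.dedup (items.map (fun pr => pvModel pr.2))
  models.foldl
    (fun s model =>
      pvPairsLoop ((items.filter (fun pr => pvModel pr.2 == model)).map (·.1)) s)
    PySem.Set.empty

-- ===== PRECONDITION & SPEC =====
-- Pre_ excludes exactly the inputs where Python A raises KeyError: a zipped product without a 'modelID' key.
def Pre_get_duplicateset_subset (list_products : List (List (String × String))) (original_indices : List Int) : Prop :=
  ∀ p ∈ list_products.take original_indices.length, "modelID" ∈ p.map (·.1)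
instance (list_products : List (List (String × String))) (original_indices : List Int) : Decidable (Pre_get_duplicateset_subset list_products original_indices) := by unfold Pre_get_duplicateset_subset; infer_instance

def pvWitness_get_duplicateset_subset : (List (List (String × String))) × List Int :=
  ([[("modelID", "m1")], [("modelID", "m1")], [("modelID", "m2")]], [7, 3, 5])

def Spec_get_duplicateset_subset (list_products : List (List (String × String))) (original_indices : List Int) (out : List (Int × Int)) : Prop := out = get_duplicateset_subset_alt list_products original_indices
instance (list_products : List (List (String × String))) (original_indices : List Int) (out : List (Int × Int)) : Decidable (Spec_get_duplicateset_subset list_products original_indices out) := by unfold Spec_get_duplicateset_subset; infer_instance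

-- ===== CLAIM (what is proved, stated in full; the proofs are below) =====
def Claim_equal_get_duplicateset_subset : Prop := ∀ (list_products : List (List (String × String))) (original_indices : List Int), Dom_get_duplicateset_subset list_products original_indices → Pre_get_duplicateset_subset list_products original_indices → Spec_get_duplicateset_subset list_products original_indices (get_duplicateset_subset list_products original_indices)

-- ===== LEMMAS AND PROOFS =====

-- tuple(sorted((x, y))) is (min, max)
theorem pvPairOf_pair (x y : Int) : pvPairOf [x, y] = pvMinMax x y := by
  by_cases h : y < x
  · simp [pvPairOf, pvMinMax, PySem.List.sorted, PySem.List.insertBy, h, not_le.mpr h]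
  · simp [pvPairOf, pvMinMax, PySem.List.sorted, PySem.List.insertBy, h, not_lt.mp h]

-- A's per-group combinations fold equals B's head/tail pair expansion
theorem combFold_eq_pairsLoop (g : List Int) (s : PySem.Set (Int × Int)) :
    (PySem.List.combinations g 2).foldl (fun s pair => PySem.Set.add s (pvPairOf pair)) s
      = pvPairsLoop g s := by
  induction g generalizing s with
  | nil => simp [pvPairsLoop, PySem.List.combinations_nil_succ]
  | cons x xs ih =>
      rw [PySem.List.combinations_cons_succ, PySem.List.combinations_one]
      rw [List.foldl_append, List.foldl_map, List.foldl_map]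
      simp only [pvPairOf_pair]
      rw [ih]
      rfl

-- A's `if len(indices) > 1` guard is redundant: short groups produce no pairs either way
theorem emitA_eq_pairsLoop (g : List Int) (s : PySem.Set (Int × Int)) :
    (if 1 < g.length then
        (PySem.List.combinations g 2).foldl (fun s pair => PySem.Set.add s (pvPairOf pair)) s
      else s) = pvPairsLoop g s := by
  split_ifs with h
  · exact combFold_eq_pairsLoop g s
  · match g, h with
    | [], _ => rfl
    | [x], _ => rfl
    | x :: y :: t, h => simp at h

-- A's grouping dict, read back through .values, yields exactly B's dedup-then-rescan traversal
theorem a_eq_b (items : List (Int × List (String × String))) :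
    ((items.foldl (fun d pr => d.modify (pvModel pr.2) [] (· ++ [pr.1])) PySem.Dict.empty).values.foldl
      (fun s indices =>
        if 1 < indices.length then
          (PySem.List.combinations indices 2).foldl (fun s pair => PySem.Set.add s (pvPairOf pair)) s
        else s)
      PySem.Set.empty)
    = (PySem.List.dedup (items.map (fun pr => pvModel pr.2))).foldl
        (fun s model =>
          pvPairsLoop ((items.filter (fun pr => pvModel pr.2 == model)).map (·.1)) s)
        PySem.Set.empty := by
  have hfold : items.foldl (fun d pr => d.modify (pvModel pr.2) [] (· ++ [pr.1])) PySem.Dict.empty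
      = (items.map (fun pr => (pvModel pr.2, pr.1))).foldl
          (fun d p => d.modify p.1 [] (· ++ [p.2])) PySem.Dict.empty := by
    rw [List.foldl_map]
  set d := items.foldl (fun d pr => d.modify (pvModel pr.2) [] (· ++ [pr.1])) PySem.Dict.empty with hd
  have hnd : d.keys.Nodup :=
    PySem.Dict.nodup_keys_foldl_modify_key items (fun pr => pvModel pr.2) []
      (fun _ pr => (· ++ [pr.1])) PySem.Dict.empty PySem.Dict.nodup_keys_empty
  have hkeys : d.keys = PySem.List.dedup (items.map (fun pr => pvModel pr.2)) := by
    rw [hd, PySem.Dict.keys_foldl_modify_key items (fun pr => pvModel pr.2) []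
      (fun _ pr => (· ++ [pr.1])) PySem.Dict.empty]
    simp [PySem.Set.update, PySem.Set.ofList_eq_foldl]
  have hgetD : ∀ m, d.getD m []
      = (items.filter (fun pr => pvModel pr.2 == m)).map (·.1) := by
    intro m
    rw [hfold, PySem.Dict.getD_foldl_modify_append]
    simp [List.filter_map, List.map_map, Function.comp_def]
  rw [PySem.Dict.values_eq_map_keys d hnd [], List.foldl_map, hkeys]
  have hfun : (fun (s : PySem.Set (Int × Int)) k =>
        if 1 < (d.getD k []).length then
          (PySem.List.combinations (d.getD k []) 2).foldl
            (fun s pair => PySem.Set.add s (pvPairOf pair)) s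
        else s)
      = fun s model =>
          pvPairsLoop ((items.filter (fun pr => pvModel pr.2 == model)).map (·.1)) s := by
    funext s m
    rw [hgetD m, emitA_eq_pairsLoop]
  rw [hfun]

-- ===== VERDICT (by name: the statement is the Claim_ definition above) =====
theorem get_duplicateset_subset_spec : Claim_equal_get_duplicateset_subset := by
  intro list_products original_indices _hdom _hpre
  unfold Spec_get_duplicateset_subset get_duplicateset_subset get_duplicateset_subset_alt
  exact a_eq_b (original_indices.zip list_products)
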